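-- pv_equiv track=rewrite | github.com/lukekasper/Personal-Projects | Python_Practice/arrays.py | buy_stock
-- ===== SOURCE A (Python) =====
-- def buy_stock(a):
--     data = []
--     buy_ind = sell_ind = i = 0
--     while i < len(a)-1:
--
--         if a[i+1] >= a[i]:
--             sell_ind += 1
--             i += 1
--             continue
--
--         if buy_ind != sell_ind:
--             data.append((buy_ind, sell_ind))
--
--         buy_ind = sell_ind
--
--         if a[i+1] < a[i]:
--             buy_ind += 1
--             i += 1
--             sell_ind = buy_ind
--             continue
--
--     if buy_ind < sell_ind:
--         data.append((buy_ind, sell_ind))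
--
--     return data
-- ===== SOURCE B (Python) =====
-- def buy_stock(a):
--     n = len(a)
--     if n < 2:
--         return []
--     breaks = [i for i in range(n - 1) if a[i + 1] < a[i]]
--     starts = [0] + [b + 1 for b in breaks]
--     ends = breaks + [n - 1]
--     return [(lo, hi) for lo, hi in zip(starts, ends) if lo < hi]
-- ===== Notes on version B (the rewrite author's own statement) =====
-- stated objective: alternative
-- what changed: Replaces the stateful while-loop tracking buy/sell cursors with a break-list decomposition: one pass collects the descent positions, which are zipped into segment (start,end) pairs and filtered to the strictly rising ones.
import Mathlib
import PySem

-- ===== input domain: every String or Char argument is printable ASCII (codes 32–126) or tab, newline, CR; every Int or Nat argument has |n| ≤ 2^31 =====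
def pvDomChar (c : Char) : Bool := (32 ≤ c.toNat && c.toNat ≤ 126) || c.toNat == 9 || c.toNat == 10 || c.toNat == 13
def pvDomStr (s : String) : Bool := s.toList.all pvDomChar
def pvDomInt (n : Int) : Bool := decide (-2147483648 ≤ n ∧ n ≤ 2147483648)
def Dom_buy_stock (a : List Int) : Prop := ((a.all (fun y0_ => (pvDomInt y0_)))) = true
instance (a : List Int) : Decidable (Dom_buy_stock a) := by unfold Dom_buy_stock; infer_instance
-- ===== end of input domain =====

-- B replaces A's stateful cursor loop by a break-position/segment decomposition (same cost, different structure).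

-- ===== PORT A =====
-- The while loop advances i by 1 on every iteration, so it is a fold over range(len(a)-1)
-- with state (data, buy_ind, sell_ind); a[i]/a[i+1] are always in range, ported with pyGetD.
-- the loop body, as a named helper so the final append can refer to its result
def buyStockLoop (a : List Int) : List (Int × Int) × Int × Int :=
  (PySem.List.pyRange 0 ((a.length : Int) - 1) 1).foldl
    (fun (st : List (Int × Int) × Int × Int) i =>
      let data := st.1
      let buy := st.2.1
      let sell := st.2.2
      if PySem.List.pyGetD a (i+1) 0 ≥ PySem.List.pyGetD a i 0 then
        (data, buy, sell + 1)
      else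
        let data := if buy ≠ sell then data ++ [(buy, sell)] else data
        let buy := sell + 1
        (data, buy, buy))
    ([], 0, 0)

def buy_stock (a : List Int) : List (Int × Int) :=
  if (buyStockLoop a).2.1 < (buyStockLoop a).2.2 then
    (buyStockLoop a).1 ++ [((buyStockLoop a).2.1, (buyStockLoop a).2.2)]
  else (buyStockLoop a).1

-- ===== PORT B =====
-- breaks = descent positions; starts = 0 :: breaks+1; ends = breaks ++ [n-1]; keep rising segments
def buyStockBreaks (a : List Int) : List Int :=
  (PySem.List.pyRange 0 ((a.length : Int) - 1) 1).filter
    (fun i => PySem.List.pyGetD a (i+1) 0 < PySem.List.pyGetD a i 0)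

def buy_stock_alt (a : List Int) : List (Int × Int) :=
  if (a.length : Int) < 2 then []
  else
    ((0 :: (buyStockBreaks a).map (· + 1)).zip
      (buyStockBreaks a ++ [(a.length : Int) - 1])).filter (fun p => p.1 < p.2)

-- ===== PRECONDITION & SPEC =====
def Spec_buy_stock (a : List Int) (out : List (Int × Int)) : Prop := out = buy_stock_alt a
instance (a : List Int) (out : List (Int × Int)) : Decidable (Spec_buy_stock a out) := by unfold Spec_buy_stock; infer_instance

-- ===== CLAIM (what is proved, stated in full; the proofs are below) =====
def Claim_equal_buy_stock : Prop := ∀ (a : List Int), Dom_buy_stock a → Spec_buy_stock a (buy_stock a)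

-- ===== LEMMAS AND PROOFS =====

-- closed segments produced while scanning the index list, starting a run at b
def pvSegs (a : List Int) (b : Int) : List Int → List (Int × Int)
  | [] => []
  | i :: l =>
    if PySem.List.pyGetD a (i+1) 0 < PySem.List.pyGetD a i 0 then
      (if b ≠ i then [(b, i)] else []) ++ pvSegs a (i+1) l
    else pvSegs a b l

-- start of the run still open after scanning the index list
def pvFbuy (a : List Int) (b : Int) : List Int → Int
  | [] => b
  | i :: l =>
    if PySem.List.pyGetD a (i+1) 0 < PySem.List.pyGetD a i 0 then
      pvFbuy a (i+1) l
    else pvFbuy a b l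

theorem pv_loopA (a : List Int) (k : Nat) :
    ∀ (s : Int) (d : List (Int × Int)) (b : Int),
    (PySem.List.pyRange s (s + k) 1).foldl
      (fun (st : List (Int × Int) × Int × Int) i =>
        let data := st.1
        let buy := st.2.1
        let sell := st.2.2
        if PySem.List.pyGetD a (i+1) 0 ≥ PySem.List.pyGetD a i 0 then
          (data, buy, sell + 1)
        else
          let data := if buy ≠ sell then data ++ [(buy, sell)] else data
          let buy := sell + 1
          (data, buy, buy))
      (d, b, s)
    = (d ++ pvSegs a b (PySem.List.pyRange s (s + k) 1),
       pvFbuy a b (PySem.List.pyRange s (s + k) 1), s + k) := by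
  induction k with
  | zero =>
    intro s d b
    simp [pvSegs, pvFbuy]
  | succ k ih =>
    intro s d b
    rw [PySem.List.pyRange_one_cons (by push_cast; omega : s < s + ((k : Nat) + 1 : Nat))]
    have hr : s + ((k : Nat) + 1 : Nat) = (s + 1) + (k : Nat) := by push_cast; omega
    rw [hr]
    simp only [List.foldl_cons]
    by_cases h : PySem.List.pyGetD a (s+1) 0 < PySem.List.pyGetD a s 0
    · simp only [pvSegs, pvFbuy, if_pos h, if_neg (not_le.mpr h), ih (s+1)]
      by_cases hbs : b = s <;> simp [hbs]
    · simp only [pvSegs, pvFbuy, if_neg h, if_pos (not_lt.mp h), ih (s+1)]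

theorem pv_loopB (a : List Int) (e : Int) :
    ∀ (l : List Int) (b : Int), (∀ j ∈ l, b ≤ j) → l.Pairwise (· < ·) →
    ((b :: (l.filter (fun i => decide (PySem.List.pyGetD a (i+1) 0 < PySem.List.pyGetD a i 0))).map (· + 1)).zip
       (l.filter (fun i => decide (PySem.List.pyGetD a (i+1) 0 < PySem.List.pyGetD a i 0)) ++ [e])).filter
       (fun p => decide (p.1 < p.2))
    = pvSegs a b l ++ (if pvFbuy a b l < e then [(pvFbuy a b l, e)] else []) := by
  intro l
  induction l with
  | nil =>
    intro b _ _
    by_cases hbe : b < e <;> simp [pvSegs, pvFbuy, hbe]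
  | cons i l ih =>
    intro b hb hp
    have hbi : b ≤ i := hb i (by simp)
    have hp' : l.Pairwise (· < ·) := hp.of_cons
    by_cases h : PySem.List.pyGetD a (i+1) 0 < PySem.List.pyGetD a i 0
    · have hfi : (i :: l).filter (fun i => decide (PySem.List.pyGetD a (i+1) 0 < PySem.List.pyGetD a i 0))
          = i :: l.filter (fun i => decide (PySem.List.pyGetD a (i+1) 0 < PySem.List.pyGetD a i 0)) := by
        simp [h]
      rw [hfi]
      have hnext : ∀ j ∈ l, i + 1 ≤ j := by
        intro j hj
        have := (List.pairwise_cons.mp hp).1 j hj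
        omega
      simp only [List.map_cons, List.cons_append, List.zip_cons_cons, List.filter_cons]
      rw [ih (i+1) hnext hp']
      by_cases hbe : b = i
      · simp [pvSegs, pvFbuy, h, hbe]
      · have hlt : b < i := lt_of_le_of_ne hbi hbe
        simp [pvSegs, pvFbuy, h, hbe, hlt]
    · have hfi : (i :: l).filter (fun i => decide (PySem.List.pyGetD a (i+1) 0 < PySem.List.pyGetD a i 0))
          = l.filter (fun i => decide (PySem.List.pyGetD a (i+1) 0 < PySem.List.pyGetD a i 0)) := by
        simp [h]
      rw [hfi, ih b (fun j hj => hb j (by simp [hj])) hp']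
      simp only [pvSegs, pvFbuy, if_neg h]

-- ===== VERDICT (by name: the statement is the Claim_ definition above) =====
theorem buy_stock_spec : Claim_equal_buy_stock := by
  intro a _
  unfold Spec_buy_stock buy_stock buy_stock_alt buyStockLoop buyStockBreaks
  by_cases hn : (a.length : Int) < 2
  · have h1 : (a.length : Int) - 1 ≤ 0 := by omega
    simp [PySem.List.pyRange_one_eq_nil h1, hn]
  · have hk : (a.length : Int) - 1 = 0 + ((a.length - 1 : Nat) : Int) := by
      have : 1 ≤ a.length := by exact_mod_cast (by omega : (1:Int) ≤ (a.length : Int))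
      push_cast [this]; omega
    rw [if_neg hn, hk, pv_loopA a (a.length - 1) 0]
    rw [pv_loopB a (0 + ((a.length - 1 : Nat) : Int)) (PySem.List.pyRange 0 (0 + ((a.length - 1 : Nat) : Int)) 1) 0
      (fun j hj => (PySem.List.mem_pyRange_one.mp hj).1) (PySem.List.pairwise_lt_pyRange_one _ _)]
    simp only [zero_add, List.nil_append]
    by_cases hf : pvFbuy a 0 (PySem.List.pyRange 0 ((a.length - 1 : Nat) : Int) 1) < ((a.length - 1 : Nat) : Int) <;>
      simp [hf]
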